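-- pv_equiv track=rewrite | github.com/bigxiongs/PAT-Basic-Level-Practice | 1003.py | iWantPass
-- ===== SOURCE A (Python) =====
-- def iWantPass(s):
--     # 字符串中必须仅有 P、 A、 T这三种字符，不可以包含其它字符；
--     # 任意形如 xPATx 的字符串都可以获得“答案正确”，其中 x 或者是空字符串，或者是仅由字母 A 组成的字符串；
--     # 如果 aPbTc 是正确的，那么 aPbATca 也是正确的，其中 a、 b、 c 均或者是空字符串，或者是仅由字母 A 组成的字符串。
--     if len(s) < 3:
--         return False
--     a, b, c = 0, 0, 0
--     status = 0
--     for char in s: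
--         if status == 0:
--             if char == 'A':
--                 a = a + 1
--             elif char == 'P':
--                 status = 1
--             else:
--                 return False
--         elif status == 1:
--             if char == 'A':
--                 b = b + 1
--             elif char == 'T':
--                 status = 2
--             else:
--                 return False
--         else:
--             if char == 'A':
--                 c = c + 1
--             else:
--                 return False
--     if b == 0:
--         return False
--     return a + (b - 1) * a == c
-- ===== SOURCE B (Python) =====
-- def iWantPass(s):
--     # Locate the unique letters P and T and check the three A-segment lengths arithmetically.
--     if any(ch not in 'PAT' for ch in s):
--         return False
--     if s.count('P') != 1 or s.count('T') != 1:
--         return False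
--     p, t = s.index('P'), s.index('T')
--     b = t - p - 1
--     if b < 1:
--         return False
--     return p * b == len(s) - t - 1
-- ===== Notes on version B (the rewrite author's own statement) =====
-- stated objective: alternative
-- what changed: Replaces the three-state character automaton with a non-sequential check: validate the alphabet, require via count exactly one occurrence each of the letters P and T, and compare the three segment lengths computed from their index positions arithmetically.
-- intended difference: On strings consisting of the letter P followed by two or more copies of the letter A (so no T at all), A returns True because its automaton never checks that the T-state was reached, while B returns False; the PAT rule requires the form aPbTc with a T present, so B's rejection is the intended value. — e.g. on iWantPass("PAA"): A returns true, B returns false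
import Mathlib
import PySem

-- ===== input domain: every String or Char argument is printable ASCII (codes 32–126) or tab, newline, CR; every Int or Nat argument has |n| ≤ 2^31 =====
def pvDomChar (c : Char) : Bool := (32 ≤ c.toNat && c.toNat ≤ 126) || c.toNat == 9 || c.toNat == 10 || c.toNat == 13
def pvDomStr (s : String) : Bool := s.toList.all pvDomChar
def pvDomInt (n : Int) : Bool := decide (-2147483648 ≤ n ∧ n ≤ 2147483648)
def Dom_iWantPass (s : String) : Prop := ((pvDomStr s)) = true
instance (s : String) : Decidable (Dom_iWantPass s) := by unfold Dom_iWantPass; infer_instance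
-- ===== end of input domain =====

-- B replaces A's three-state character automaton with a count/index arithmetic check (alternative
-- decomposition, same O(n) cost); on the letter P followed by two or more copies of the letter A
-- (no T anywhere) A accepts while B rejects — stated as the intended difference D_ below.

-- ===== PORT A =====
def pvGoA : List Char → Nat → Int → Int → Int → Bool
  | [], _, a, b, c => if b = 0 then false else decide (a + (b - 1) * a = c)
  | ch :: rest, status, a, b, c =>
    if status = 0 then
      if ch = 'A' then pvGoA rest 0 (a + 1) b c
      else if ch = 'P' then pvGoA rest 1 a b c
      else false
    else if status = 1 then
      if ch = 'A' then pvGoA rest 1 a (b + 1) c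
      else if ch = 'T' then pvGoA rest 2 a b c
      else false
    else
      if ch = 'A' then pvGoA rest status a b (c + 1)
      else false

def iWantPass (s : String) : Bool :=
  if PySem.Str.len s < 3 then false else pvGoA s.toList 0 0 0 0

-- ===== PORT B =====
def iWantPass_alt (s : String) : Bool :=
  let l := s.toList
  if l.any (fun ch => !(PySem.Chars.isIn [ch] ['P', 'A', 'T'])) then false
  else if PySem.List.count l 'P' ≠ 1 ∨ PySem.List.count l 'T' ≠ 1 then false
  else
    match PySem.List.index? l 'P', PySem.List.index? l 'T' with
    | some p, some t =>
      let b : Int := (t : Int) - (p : Int) - 1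
      if b < 1 then false
      else decide ((p : Int) * b = PySem.Str.len s - (t : Int) - 1)
    | _, _ => false   -- unreachable: the count guards ensure both index? calls hit

-- ===== PRECONDITION & SPEC =====
-- On strings made of the letter P followed by k ≥ 2 copies of the letter A (so no T at all) A returns
-- True — its automaton never checks that the T-state was reached — while B returns False; the
-- required form aPbTc contains a T, so B's rejection is the intended value.
def D_iWantPass (s : String) : Prop :=
  3 ≤ s.toList.length ∧ s.toList.head? = some 'P' ∧ s.toList.tail.all (· == 'A') = true
instance (s : String) : Decidable (D_iWantPass s) := by unfold D_iWantPass; infer_instance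

def Spec_iWantPass (s : String) (out : Bool) : Prop := ¬ D_iWantPass s → out = iWantPass_alt s
instance (s : String) (out : Bool) : Decidable (Spec_iWantPass s out) := by unfold Spec_iWantPass; infer_instance

def pvDiffWitness_iWantPass : String := "PAA"
def pvDiffWitnessOut_iWantPass : Bool × Bool := (true, false)

-- ===== CLAIM (what is proved, stated in full; the proofs are below) =====
def Claim_unchanged_iWantPass : Prop := ∀ (s : String), Dom_iWantPass s → Spec_iWantPass s (iWantPass s)
def Claim_changed_iWantPass : Prop := Dom_iWantPass (pvDiffWitness_iWantPass) ∧ D_iWantPass (pvDiffWitness_iWantPass) ∧ iWantPass (pvDiffWitness_iWantPass) = pvDiffWitnessOut_iWantPass.1 ∧ iWantPass_alt (pvDiffWitness_iWantPass) = pvDiffWitnessOut_iWantPass.2 ∧ pvDiffWitnessOut_iWantPass.1 ≠ pvDiffWitnessOut_iWantPass.2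
def Claim_exact_iWantPass : Prop := ∀ (s : String), Dom_iWantPass s → D_iWantPass s → iWantPass s ≠ iWantPass_alt s

-- ===== LEMMAS AND PROOFS =====

-- the accepted canonical shape: A^x P A^y T A^z with y ≥ 1 and x*y = z
def PropC (l : List Char) : Prop :=
  ∃ x y z : Nat, l = List.replicate x 'A' ++ 'P' :: (List.replicate y 'A' ++ 'T' :: List.replicate z 'A')
    ∧ 1 ≤ y ∧ x * y = z

theorem isIn_singleton_iff (ch : Char) (l : List Char) : PySem.Chars.isIn [ch] l = true ↔ ch ∈ l := by
  rw [PySem.Chars.isIn_iff_infix]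
  constructor
  · exact fun h => h.mem (by simp)
  · intro h
    obtain ⟨pre, suf, hp, -⟩ := List.eq_append_cons_of_mem h
    exact ⟨pre, suf, by rw [hp]; simp⟩


theorem pvGoA1_cons (ch : Char) (rest : List Char) (a b c : Int) :
    pvGoA (ch :: rest) 1 a b c =
      (if ch = 'A' then pvGoA rest 1 a (b + 1) c else if ch = 'T' then pvGoA rest 2 a b c else false) := rfl


theorem pvGoA0_cons (ch : Char) (rest : List Char) (a b c : Int) :
    pvGoA (ch :: rest) 0 a b c =
      (if ch = 'A' then pvGoA rest 0 (a + 1) b c else if ch = 'P' then pvGoA rest 1 a b c else false) := rfl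


theorem gA2_iff (l : List Char) : ∀ (a b c : Int),
    pvGoA l 2 a b c = true ↔ (∀ ch ∈ l, ch = 'A') ∧ ¬(b = 0) ∧ a + (b - 1) * a = c + l.length := by
  induction l with
  | nil =>
    intro a b c; simp only [pvGoA, List.length_nil, Nat.cast_zero, add_zero, List.not_mem_nil]
    split_ifs with hb <;> simp [hb]
  | cons ch rest ih =>
    intro a b c
    simp only [pvGoA]
    by_cases hA : ch = 'A'
    · subst hA
      rw [if_neg (by decide : ¬(2 = 0)), if_neg (by decide : ¬(2 = 1)), if_pos rfl, ih]
      constructor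
      · rintro ⟨h1, h2, h3⟩
        refine ⟨?_, h2, ?_⟩
        · intro x hx
          rcases List.mem_cons.mp hx with rfl | hx'
          · rfl
          · exact h1 x hx'
        · simp only [List.length_cons] at *; push_cast at h3 ⊢; linarith
      · rintro ⟨h1, h2, h3⟩
        refine ⟨fun x hx => h1 x (List.mem_cons_of_mem _ hx), h2, ?_⟩
        simp only [List.length_cons] at h3; push_cast at h3 ⊢; linarith
    · rw [if_neg (by decide : ¬(2 = 0)), if_neg (by decide : ¬(2 = 1)), if_neg hA]
      constructor
      · intro h; cases h
      · rintro ⟨h1, -, -⟩; exact absurd (h1 ch (by simp)) hA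


theorem gA1_iff (l : List Char) : ∀ (a b c : Int),
    pvGoA l 1 a b c = true ↔
      (∃ y z : Nat, l = List.replicate y 'A' ++ 'T' :: List.replicate z 'A'
          ∧ ¬(b + y = 0) ∧ a + (b + y - 1) * a = c + z)
      ∨ (∃ y : Nat, l = List.replicate y 'A' ∧ ¬(b + y = 0) ∧ a + (b + y - 1) * a = c) := by
  induction l with
  | nil =>
    intro a b c
    simp only [pvGoA]
    constructor
    · intro h
      by_cases hb : b = 0
      · rw [if_pos hb] at h; cases h
      · rw [if_neg hb] at h
        exact Or.inr ⟨0, by simp, by simpa using hb, by simpa using of_decide_eq_true h⟩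
    · rintro (⟨y, z, hl, -, -⟩ | ⟨y, hl, hb, he⟩)
      · exact absurd hl (by simp)
      · have hy : y = 0 := by
          have := congrArg List.length hl; simpa using this.symm
        subst hy
        simp only [Nat.cast_zero, add_zero] at hb he
        rw [if_neg hb]; exact decide_eq_true he
  | cons ch rest ih =>
    intro a b c
    rw [pvGoA1_cons]
    by_cases hA : ch = 'A'
    · subst hA
      rw [if_pos rfl, ih]
      constructor
      · rintro (⟨y, z, hl, hb, he⟩ | ⟨y, hl, hb, he⟩)
        · exact Or.inl ⟨y + 1, z, by simp [List.replicate_succ, hl], by push_cast at hb ⊢; omega,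
            by push_cast at he ⊢; linarith⟩
        · exact Or.inr ⟨y + 1, by simp [List.replicate_succ, hl], by push_cast at hb ⊢; omega,
            by push_cast at he ⊢; linarith⟩
      · rintro (⟨y, z, hl, hb, he⟩ | ⟨y, hl, hb, he⟩)
        · cases y with
          | zero => simp at hl
          | succ y' =>
            rw [List.replicate_succ] at hl
            simp only [List.cons_append, List.cons.injEq] at hl
            exact Or.inl ⟨y', z, hl.2, by push_cast at hb ⊢; omega, by push_cast at he ⊢; linarith⟩
        · cases y with
          | zero => simp at hl
          | succ y' =>
            rw [List.replicate_succ] at hl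
            simp only [List.cons.injEq] at hl
            exact Or.inr ⟨y', hl.2, by push_cast at hb ⊢; omega, by push_cast at he ⊢; linarith⟩
    · rw [if_neg hA]
      by_cases hT : ch = 'T'
      · subst hT
        rw [if_pos rfl, gA2_iff]
        constructor
        · rintro ⟨h1, h2, h3⟩
          exact Or.inl ⟨0, rest.length, by
              simp only [List.replicate_zero, List.nil_append, List.cons.injEq]
              exact ⟨trivial, List.eq_replicate_of_mem h1⟩, by simpa using h2, by simpa using h3⟩
        · rintro (⟨y, z, hl, hb, he⟩ | ⟨y, hl, -, -⟩)
          · cases y with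
            | zero =>
              simp only [List.replicate_zero, List.nil_append, List.cons.injEq] at hl
              refine ⟨?_, by simpa using hb, ?_⟩
              · intro x hx; rw [hl.2] at hx; exact List.eq_of_mem_replicate hx
              · rw [hl.2]; simpa using he
            | succ y' => rw [List.replicate_succ] at hl; simp at hl
          · cases y with
            | zero => simp at hl
            | succ y' => rw [List.replicate_succ] at hl; simp at hl
      · rw [if_neg hT]
        constructor
        · intro h; cases h
        · rintro (⟨y, z, hl, -, -⟩ | ⟨y, hl, -, -⟩)
          · cases y with
            | zero => simp only [List.replicate_zero, List.nil_append, List.cons.injEq] at hl; exact (hT hl.1).elim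
            | succ y' => rw [List.replicate_succ] at hl; simp only [List.cons_append, List.cons.injEq] at hl; exact (hA hl.1).elim
          · cases y with
            | zero => simp at hl
            | succ y' => rw [List.replicate_succ] at hl; simp only [List.cons.injEq] at hl; exact (hA hl.1).elim


theorem gA0_iff (l : List Char) : ∀ (a : Int),
    pvGoA l 0 a 0 0 = true ↔
      ∃ (x : Nat) (l' : List Char), l = List.replicate x 'A' ++ 'P' :: l'
        ∧ pvGoA l' 1 (a + x) 0 0 = true := by
  induction l with
  | nil =>
    intro a
    constructor
    · intro h; rw [show pvGoA [] 0 a 0 0 = false from rfl] at h; cases h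
    · rintro ⟨x, l', hl, -⟩; exact absurd hl (by simp)
  | cons ch rest ih =>
    intro a
    rw [pvGoA0_cons]
    by_cases hA : ch = 'A'
    · subst hA
      rw [if_pos rfl, ih]
      constructor
      · rintro ⟨x, l', hl, hrun⟩
        exact ⟨x + 1, l', by simp [List.replicate_succ, hl], by push_cast at hrun ⊢; convert hrun using 2; ring⟩
      · rintro ⟨x, l', hl, hrun⟩
        cases x with
        | zero => simp at hl
        | succ x' =>
          rw [List.replicate_succ] at hl
          simp only [List.cons_append, List.cons.injEq] at hl
          exact ⟨x', l', hl.2, by push_cast at hrun ⊢; convert hrun using 2; ring⟩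
    · rw [if_neg hA]
      by_cases hP : ch = 'P'
      · subst hP
        rw [if_pos rfl]
        constructor
        · intro h
          exact ⟨0, rest, by simp, by simpa using h⟩
        · rintro ⟨x, l', hl, hrun⟩
          cases x with
          | zero =>
            simp only [List.replicate_zero, List.nil_append, List.cons.injEq] at hl
            rw [hl.2]; simpa using hrun
          | succ x' => rw [List.replicate_succ] at hl; simp only [List.cons_append, List.cons.injEq] at hl; exact (hA hl.1).elim
      · rw [if_neg hP]
        constructor
        · intro h; cases h
        · rintro ⟨x, l', hl, -⟩
          cases x with
          | zero => simp only [List.replicate_zero, List.nil_append, List.cons.injEq] at hl; exact (hP hl.1).elim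
          | succ x' => rw [List.replicate_succ] at hl; simp only [List.cons_append, List.cons.injEq] at hl; exact (hA hl.1).elim


theorem A_iff (s : String) :
    iWantPass s = true ↔ PropC s.toList ∨ (∃ y : Nat, 2 ≤ y ∧ s.toList = 'P' :: List.replicate y 'A') := by
  unfold iWantPass
  rw [PySem.Str.len_eq]
  by_cases hlen : (s.toList.length : Int) < 3
  · rw [if_pos hlen]
    constructor
    · intro h; cases h
    · rintro (⟨x, y, z, hl, hy, -⟩ | ⟨y, hy, hl⟩) <;>
        · exfalso
          have := congrArg List.length hl
          simp only [List.length_append, List.length_replicate, List.length_cons] at this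
          omega
  · rw [if_neg hlen, gA0_iff]
    have hlen' : 3 ≤ s.toList.length := by omega
    constructor
    · rintro ⟨x, l', hl, hrun⟩
      rw [gA1_iff] at hrun
      rcases hrun with ⟨y, z, hl', hy, he⟩ | ⟨y, hl', hy, he⟩
      · left
        refine ⟨x, y, z, by rw [hl, hl'], by omega, ?_⟩
        have h2 : ((x * y : Nat) : Int) = (z : Int) := by push_cast; linear_combination he
        exact_mod_cast h2
      · right
        have h2 : ((x * y : Nat) : Int) = 0 := by push_cast; linear_combination he
        have h3 : x * y = 0 := by exact_mod_cast h2
        have hy' : 1 ≤ y := by omega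
        have hx : x = 0 := by
          rcases Nat.mul_eq_zero.mp h3 with h | h
          · exact h
          · omega
        subst hx
        have hll : s.toList = 'P' :: List.replicate y 'A' := by
          rw [hl, hl']; simp
        have := congrArg List.length hll
        simp only [List.length_cons, List.length_replicate] at this
        exact ⟨y, by omega, hll⟩
    · rintro (⟨x, y, z, hl, hy, hxyz⟩ | ⟨y, hy, hl⟩)
      · refine ⟨x, List.replicate y 'A' ++ 'T' :: List.replicate z 'A', hl, ?_⟩
        rw [gA1_iff]
        left
        refine ⟨y, z, rfl, by omega, ?_⟩
        have h2 : ((x * y : Nat) : Int) = (z : Int) := by exact_mod_cast hxyz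
        push_cast at h2 ⊢
        linear_combination h2
      · refine ⟨0, List.replicate y 'A', by simpa using hl, ?_⟩
        rw [gA1_iff]
        right
        exact ⟨y, rfl, by omega, by ring⟩

theorem B_iff (s : String) : iWantPass_alt s = true ↔ PropC s.toList := by
  unfold iWantPass_alt
  simp only []
  constructor
  · intro h
    split_ifs at h with h1 h2
    · -- guards passed
      push Not at h2
      obtain ⟨hcP, hcT⟩ := h2
      rw [PySem.List.count_eq] at hcP hcT
      rcases hidP : PySem.List.index? s.toList 'P' with _ | p
      · rw [PySem.List.index?_eq_none_iff] at hidP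
        exact absurd (List.count_pos_iff.mp (by omega)) hidP
      rcases hidT : PySem.List.index? s.toList 'T' with _ | t
      · rw [PySem.List.index?_eq_none_iff] at hidT
        exact absurd (List.count_pos_iff.mp (by omega)) hidT
      rw [hidP, hidT] at h
      obtain ⟨preP, sufP, hP, hlenP, hnP⟩ := (PySem.List.index?_eq_some_iff _ _ _).mp hidP
      obtain ⟨preT, sufT, hT, hlenT, hnT⟩ := (PySem.List.index?_eq_some_iff _ _ _).mp hidT
      dsimp only at h
      split_ifs at h with hb
      have heq := of_decide_eq_true h
      rw [PySem.Str.len_eq] at heq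
      push Not at hb
      have hpt : p + 2 ≤ t := by omega
      -- reconcile the two decompositions
      have hsplit : preP ++ 'P' :: sufP = preT ++ 'T' :: sufT := by rw [← hP, ← hT]
      obtain ⟨mid, hpre, hmid⟩ :
          ∃ mid, preT = preP ++ 'P' :: mid ∧ sufP = mid ++ 'T' :: sufT := by
        have hnr : ¬ ∃ c', preP = preT ++ c' ∧ 'T' :: sufT = c' ++ 'P' :: sufP := by
          rintro ⟨c', hc1, -⟩
          have := congrArg List.length hc1
          simp only [List.length_append] at this
          omega
        obtain ⟨a', ha1, ha2⟩ := (List.append_eq_append_iff.mp hsplit).resolve_right hnr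
        cases a' with
        | nil => simp at ha2
        | cons hd tl =>
          simp only [List.cons_append, List.cons.injEq] at ha2
          exact ⟨tl, by rw [ha1, ha2.1], ha2.2⟩
      have hfull : s.toList = preP ++ 'P' :: (mid ++ 'T' :: sufT) := by rw [hP, hmid]
      have hlmid : p + 1 + mid.length = t := by
        have := congrArg List.length hpre
        simp only [List.length_append, List.length_cons] at this
        omega
      have hall : ∀ ch ∈ s.toList, ch = 'P' ∨ ch = 'A' ∨ ch = 'T' := by
        intro ch hch
        have h1' : ∀ x ∈ s.toList, PySem.Chars.isIn [x] ['P', 'A', 'T'] = true := by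
          simpa using h1
        simpa using (isIn_singleton_iff ch _).mp (h1' ch hch)
      have hcP' : List.count 'P' preP = 0 ∧ List.count 'P' mid = 0 ∧ List.count 'P' sufT = 0 := by
        rw [hfull] at hcP
        simp [List.count_append] at hcP
        omega
      have hcT' : List.count 'T' sufT = 0 := by
        rw [hT] at hcT
        simp [List.count_append] at hcT
        omega
      have hnTpre : 'T' ∉ preP ∧ 'T' ∉ mid := by
        rw [hpre] at hnT
        simp only [List.mem_append, List.mem_cons] at hnT
        push Not at hnT
        exact ⟨hnT.1, hnT.2.2⟩
      have hApre : preP = List.replicate p 'A' := by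
        rw [← hlenP]
        apply List.eq_replicate_of_mem
        intro ch hch
        rcases hall ch (by rw [hfull]; simp [hch]) with h' | h' | h'
        · exact absurd (h' ▸ hch) hnP
        · exact h'
        · exact absurd (h' ▸ hch) hnTpre.1
      have hAmid : mid = List.replicate mid.length 'A' := by
        apply List.eq_replicate_of_mem
        intro ch hch
        rcases hall ch (by rw [hfull]; simp [hch]) with h' | h' | h'
        · exact absurd (h' ▸ hch) (List.count_eq_zero.mp hcP'.2.1)
        · exact h'
        · exact absurd (h' ▸ hch) hnTpre.2
      have hAsuf : sufT = List.replicate sufT.length 'A' := by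
        apply List.eq_replicate_of_mem
        intro ch hch
        rcases hall ch (by rw [hT]; simp [hch]) with h' | h' | h'
        · exact absurd (h' ▸ hch) (List.count_eq_zero.mp hcP'.2.2)
        · exact h'
        · exact absurd (h' ▸ hch) (List.count_eq_zero.mp hcT')
      have hn : s.toList.length = p + 1 + mid.length + 1 + sufT.length := by
        rw [hfull]; simp only [List.length_append, List.length_cons, hlenP]; omega
      refine ⟨p, mid.length, sufT.length, ?_, by omega, ?_⟩
      · rw [hfull, hApre]
        rw [hAmid, hAsuf]
        simp only [List.length_replicate]
      · have h2 : ((p * mid.length : Nat) : Int) = (sufT.length : Int) := by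
          rw [hn] at heq
          have ht : (t : Int) = (p : Int) + 1 + (mid.length : Int) := by exact_mod_cast hlmid.symm
          rw [ht] at heq
          push_cast at heq ⊢
          linear_combination heq
        exact_mod_cast h2
  · rintro ⟨x, y, z, hl, hy, hxyz⟩
    have hn : s.toList.length = x + y + z + 2 := by
      rw [hl]; simp only [List.length_append, List.length_cons, List.length_replicate]; omega
    have h1 : ¬((s.toList.any fun ch => !PySem.Chars.isIn [ch] ['P', 'A', 'T']) = true) := by
      simp only [List.any_eq_true, not_exists]
      intro ch
      rintro ⟨hch, hbad⟩
      have hmem : ch ∈ (['P', 'A', 'T'] : List Char) := by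
        rw [hl] at hch
        simp only [List.mem_append, List.mem_cons, List.mem_replicate] at hch
        rcases hch with ⟨-, rfl⟩ | rfl | ⟨-, rfl⟩ | rfl | ⟨-, rfl⟩ <;> simp
      rw [(isIn_singleton_iff ch _).mpr hmem] at hbad
      simp at hbad
    have h2 : ¬(PySem.List.count s.toList 'P' ≠ 1 ∨ PySem.List.count s.toList 'T' ≠ 1) := by
      rw [PySem.List.count_eq, PySem.List.count_eq, hl]
      simp [List.count_append, List.count_replicate]
    have hidP : PySem.List.index? s.toList 'P' = some x := by
      rw [PySem.List.index?_eq_some_iff]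
      exact ⟨List.replicate x 'A', _, hl, List.length_replicate, by simp [List.mem_replicate]⟩
    have hidT : PySem.List.index? s.toList 'T' = some (x + 1 + y) := by
      rw [PySem.List.index?_eq_some_iff]
      refine ⟨List.replicate x 'A' ++ 'P' :: List.replicate y 'A', List.replicate z 'A', ?_, ?_, ?_⟩
      · rw [hl]; simp
      · simp only [List.length_append, List.length_cons, List.length_replicate]; omega
      · simp [List.mem_replicate]
    rw [if_neg h1, if_neg h2, hidP, hidT]
    dsimp only
    rw [if_neg (by push_cast; omega)]
    apply decide_eq_true
    rw [PySem.Str.len_eq, hn]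
    have h3 : ((x * y : Nat) : Int) = (z : Int) := by exact_mod_cast hxyz
    push_cast at h3 ⊢
    linear_combination h3


theorem D_of_diff (s : String) (y : Nat) (h2 : 2 ≤ y)
    (hl : s.toList = 'P' :: List.replicate y 'A') : D_iWantPass s := by
  refine ⟨?_, ?_, ?_⟩
  · rw [hl]; simp only [List.length_cons, List.length_replicate]; omega
  · rw [hl]; rfl
  · rw [hl]; simp

theorem diff_of_D (s : String) (hD : D_iWantPass s) :
    ∃ y : Nat, 2 ≤ y ∧ s.toList = 'P' :: List.replicate y 'A' := by
  obtain ⟨hlen, hhd, hall⟩ := hD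
  cases hl0 : s.toList with
  | nil => rw [hl0] at hhd; cases hhd
  | cons c rest =>
    rw [hl0] at hhd hall hlen
    simp only [List.head?_cons, Option.some.injEq] at hhd
    subst hhd
    simp only [List.tail_cons, List.all_eq_true, beq_iff_eq] at hall
    have hrep : rest = List.replicate rest.length 'A' := List.eq_replicate_of_mem hall
    simp only [List.length_cons] at hlen
    exact ⟨rest.length, by omega, by rw [← hrep]⟩

theorem not_PropC_of_D (s : String) (hD : D_iWantPass s) : ¬ PropC s.toList := by
  rintro ⟨x, y, z, hl, -, -⟩
  obtain ⟨y', -, hl'⟩ := diff_of_D s hD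
  have hTmem : 'T' ∈ s.toList := by rw [hl]; simp
  rw [hl'] at hTmem
  simp only [List.mem_cons, List.mem_replicate] at hTmem
  rcases hTmem with h | ⟨-, h⟩ <;> cases h

theorem A_true_of_D (s : String) (hD : D_iWantPass s) : iWantPass s = true :=
  (A_iff s).mpr (Or.inr (diff_of_D s hD))

-- ===== VERDICT (by name: the statement is the Claim_ definition above) =====
theorem iWantPass_spec : Claim_unchanged_iWantPass := by
  intro s _ hD
  have hAB : (iWantPass s = true) ↔ (iWantPass_alt s = true) := by
    rw [A_iff, B_iff]
    constructor
    · rintro (h | ⟨y, h2, hl⟩)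
      · exact h
      · exact absurd (D_of_diff s y h2 hl) hD
    · exact Or.inl
  exact Bool.eq_iff_iff.mpr hAB

theorem iWantPass_changed : Claim_changed_iWantPass := by unfold Claim_changed_iWantPass; decide

theorem iWantPass_tight : Claim_exact_iWantPass := by
  intro s _ hD
  have hA := A_true_of_D s hD
  have hB : iWantPass_alt s = false := by
    cases hx : iWantPass_alt s with
    | false => rfl
    | true => exact absurd ((B_iff s).mp hx) (not_PropC_of_D s hD)
  rw [hA, hB]
  exact Bool.noConfusion
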